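-- pv_equiv track=rewrite | github.com/Elimirage/my-study-plan-app | plan.py | balanced_distribution
-- ===== SOURCE A (Python) =====
-- def balanced_distribution(obligatory, variative):
--     semester_plan = {s: [] for s in range(1, 8)}
--
--     sems_obl = [1, 2, 3, 4, 5, 6]
--     for i, disc in enumerate(obligatory):
--         semester_plan[sems_obl[i % len(sems_obl)]].append(disc)
--
--     sems_var = [3, 4, 5, 6, 7]
--     for i, disc in enumerate(variative):
--         semester_plan[sems_var[i % len(sems_var)]].append(disc)
--
--     return semester_plan
-- ===== SOURCE B (Python) =====
-- def balanced_distribution(obligatory, variative):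
--     def every_nth(xs, start, step):
--         return [xs[i] for i in range(start, len(xs), step)]
--     return {
--         s: (every_nth(obligatory, s - 1, 6) if s <= 6 else [])
--            + (every_nth(variative, s - 3, 5) if s >= 3 else [])
--         for s in range(1, 8)
--     }
-- ===== Notes on version B (the rewrite author's own statement) =====
-- stated objective: idiomatic
-- what changed: B builds the plan as a single dict comprehension, computing each semester's bucket at once from stride slices range(start, len, step) of the inputs, instead of A's item-by-item round-robin loop appending via i % len.
import Mathlib
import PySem

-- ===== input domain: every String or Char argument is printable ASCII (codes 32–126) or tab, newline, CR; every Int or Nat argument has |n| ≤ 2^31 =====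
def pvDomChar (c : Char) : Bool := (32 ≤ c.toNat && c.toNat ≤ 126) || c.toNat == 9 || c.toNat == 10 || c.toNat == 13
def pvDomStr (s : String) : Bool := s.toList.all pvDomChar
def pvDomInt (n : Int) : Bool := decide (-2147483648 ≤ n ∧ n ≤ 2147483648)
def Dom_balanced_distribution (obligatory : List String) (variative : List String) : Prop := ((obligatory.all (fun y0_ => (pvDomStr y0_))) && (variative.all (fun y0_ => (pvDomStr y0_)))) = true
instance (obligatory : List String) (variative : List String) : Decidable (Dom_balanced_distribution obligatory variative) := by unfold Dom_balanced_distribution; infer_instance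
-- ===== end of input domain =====

-- B replaces A's item-by-item round-robin appends (i % len) with a per-semester dict
-- comprehension built from stride index ranges; same result, idiomatic decomposition.


-- ===== PORT A =====
def semsObl : List Int := [1, 2, 3, 4, 5, 6]
def semsVar : List Int := [3, 4, 5, 6, 7]

-- semester_plan[k].append(disc) is ported as Dict.modify k [] (· ++ [disc]); the key is
-- always present (the dict was initialised with keys 1..7), so Python's KeyError never fires.
def balanced_distribution (obligatory : List String) (variative : List String) : List (Int × List String) :=
  let d0 := (PySem.List.pyRange 1 8 1).foldl (fun d s => d.insert s ([] : List String)) PySem.Dict.empty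
  let d1 := (PySem.List.enumerate obligatory).foldl
    (fun d p => d.modify (PySem.List.pyGetD semsObl (PySem.Int.mod p.1 (semsObl.length : Int)) 0) [] (fun l => l ++ [p.2])) d0
  let d2 := (PySem.List.enumerate variative).foldl
    (fun d p => d.modify (PySem.List.pyGetD semsVar (PySem.Int.mod p.1 (semsVar.length : Int)) 0) [] (fun l => l ++ [p.2])) d1
  d2.items

-- ===== PORT B =====
-- every_nth(xs, start, step) = [xs[i] for i in range(start, len(xs), step)]
def everyNth (xs : List String) (start step : Int) : List String :=
  (PySem.List.pyRange start (xs.length : Int) step).map (fun i => PySem.List.pyGetD xs i "")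

def balanced_distribution_alt (obligatory : List String) (variative : List String) : List (Int × List String) :=
  (PySem.List.pyRange 1 8 1).map (fun s =>
    (s, (if s ≤ 6 then everyNth obligatory (s - 1) 6 else [])
        ++ (if 3 ≤ s then everyNth variative (s - 3) 5 else [])))

-- ===== PRECONDITION & SPEC =====
def Spec_balanced_distribution (obligatory : List String) (variative : List String) (out : List (Int × List String)) : Prop := out = balanced_distribution_alt obligatory variative
instance (obligatory : List String) (variative : List String) (out : List (Int × List String)) : Decidable (Spec_balanced_distribution obligatory variative out) := by unfold Spec_balanced_distribution; infer_instance

-- ===== CLAIM (what is proved, stated in full; the proofs are below) =====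
def Claim_equal_balanced_distribution : Prop := ∀ (obligatory : List String) (variative : List String), Dom_balanced_distribution obligatory variative → Spec_balanced_distribution obligatory variative (balanced_distribution obligatory variative)

-- ===== LEMMAS AND PROOFS =====

-- The sublist of xs that A's round-robin loop (over `sems`, starting at index i) sends to bucket j.
def selKeyed (sems : List Int) (j : Int) : List String → Int → List String
  | [], _ => []
  | x :: xs, i =>
    (if PySem.List.pyGetD sems (PySem.Int.mod i (sems.length : Int)) 0 = j then [x] else [])
      ++ selKeyed sems j xs (i + 1)

-- The sublist of xs at positions p (counted from i) with (i+p) ≡ r (mod k).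
def selMod (k r : Int) : List String → Int → List String
  | [], _ => []
  | x :: xs, i => (if PySem.Int.mod i k = r then [x] else []) ++ selMod k r xs (i + 1)

theorem foldA_getD (sems : List Int) (xs : List String) (d : PySem.Dict Int (List String))
    (i j : Int) :
    ((PySem.List.enumerate xs i).foldl
      (fun d p => d.modify (PySem.List.pyGetD sems (PySem.Int.mod p.1 (sems.length : Int)) 0) [] (fun l => l ++ [p.2])) d).getD j []
    = d.getD j [] ++ selKeyed sems j xs i := by
  induction xs generalizing d i with
  | nil => simp [selKeyed, PySem.List.enumerate_nil]
  | cons x xs ih =>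
    rw [PySem.List.enumerate_cons, List.foldl_cons, ih, selKeyed]
    rw [PySem.Dict.getD_modify]
    by_cases h : PySem.List.pyGetD sems (PySem.Int.mod i (sems.length : Int)) 0 = j
    · simp [h, List.append_assoc]
    · have h' : ¬ j = PySem.List.pyGetD sems (PySem.Int.mod i (sems.length : Int)) 0 :=
        fun hh => h hh.symm
      simp [h, h']

theorem foldA_keys (sems : List Int) (xs : List String) (d : PySem.Dict Int (List String))
    (i : Int) (hsem : sems ≠ []) (hmem : ∀ s ∈ sems, s ∈ d.keys) :
    ((PySem.List.enumerate xs i).foldl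
      (fun d p => d.modify (PySem.List.pyGetD sems (PySem.Int.mod p.1 (sems.length : Int)) 0) [] (fun l => l ++ [p.2])) d).keys
    = d.keys := by
  induction xs generalizing d i with
  | nil => simp [PySem.List.enumerate_nil]
  | cons x xs ih =>
    rw [PySem.List.enumerate_cons, List.foldl_cons]
    have hlen : (0 : Int) < (sems.length : Int) := by
      have := List.length_pos_of_ne_nil hsem; exact_mod_cast this
    have hkey : PySem.List.pyGetD sems (PySem.Int.mod i (sems.length : Int)) 0 ∈ sems := by
      apply PySem.List.pyGetD_mem
      constructor
      · have := PySem.Int.mod_nonneg i hlen; omega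
      · exact PySem.Int.mod_lt i hlen
    have hcont : d.contains (PySem.List.pyGetD sems (PySem.Int.mod i (sems.length : Int)) 0) = true := by
      rw [PySem.Dict.contains_iff_mem_keys]; exact hmem _ hkey
    have hk : (d.modify (PySem.List.pyGetD sems (PySem.Int.mod i (sems.length : Int)) 0) [] (fun l => l ++ [x])).keys = d.keys := by
      rw [PySem.Dict.keys_modify, PySem.Dict.keys_insert_of_contains _ _ hcont]
    rw [ih _ _ (by rw [hk]; exact hmem)]
    exact hk

theorem selKeyed_nil_of_not_mem (sems : List Int) (j : Int) (hj : j ∉ sems) (hsem : sems ≠ [])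
    (xs : List String) (i : Int) : selKeyed sems j xs i = [] := by
  induction xs generalizing i with
  | nil => rfl
  | cons x xs ih =>
    have hlen : (0 : Int) < (sems.length : Int) := by
      have := List.length_pos_of_ne_nil hsem; exact_mod_cast this
    have hkey : PySem.List.pyGetD sems (PySem.Int.mod i (sems.length : Int)) 0 ∈ sems := by
      apply PySem.List.pyGetD_mem
      constructor
      · have := PySem.Int.mod_nonneg i hlen; omega
      · exact PySem.Int.mod_lt i hlen
    rw [selKeyed]
    rw [if_neg (fun h : _ = j => hj (h ▸ hkey)), List.nil_append]
    exact ih _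

theorem key_obl (i : Int) :
    PySem.List.pyGetD semsObl (PySem.Int.mod i ((semsObl : List Int).length : Int)) 0
      = PySem.Int.mod i 6 + 1 := by
  have h0 : (0 : Int) ≤ PySem.Int.mod i 6 := PySem.Int.mod_nonneg i (by norm_num)
  have h6 : PySem.Int.mod i 6 < 6 := PySem.Int.mod_lt i (by norm_num)
  have hlen : ((semsObl : List Int).length : Int) = 6 := by decide
  rw [hlen]
  interval_cases h : PySem.Int.mod i 6 <;> simp [semsObl, PySem.List.pyGetD_of_nonneg]

theorem key_var (i : Int) :
    PySem.List.pyGetD semsVar (PySem.Int.mod i ((semsVar : List Int).length : Int)) 0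
      = PySem.Int.mod i 5 + 3 := by
  have h0 : (0 : Int) ≤ PySem.Int.mod i 5 := PySem.Int.mod_nonneg i (by norm_num)
  have h5 : PySem.Int.mod i 5 < 5 := PySem.Int.mod_lt i (by norm_num)
  have hlen : ((semsVar : List Int).length : Int) = 5 := by decide
  rw [hlen]
  interval_cases h : PySem.Int.mod i 5 <;> simp [semsVar, PySem.List.pyGetD_of_nonneg]

theorem selKeyed_obl (j : Int) (xs : List String) (i : Int) :
    selKeyed semsObl j xs i = selMod 6 (j - 1) xs i := by
  induction xs generalizing i with
  | nil => rfl
  | cons x xs ih =>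
    rw [selKeyed, selMod, ih, key_obl]
    congr 1
    by_cases hc : PySem.Int.mod i 6 = j - 1
    · rw [if_pos (by omega), if_pos hc]
    · rw [if_neg (by omega), if_neg hc]

theorem selKeyed_var (j : Int) (xs : List String) (i : Int) :
    selKeyed semsVar j xs i = selMod 5 (j - 3) xs i := by
  induction xs generalizing i with
  | nil => rfl
  | cons x xs ih =>
    rw [selKeyed, selMod, ih, key_var]
    congr 1
    by_cases hc : PySem.Int.mod i 5 = j - 3
    · rw [if_pos (by omega), if_pos hc]
    · rw [if_neg (by omega), if_neg hc]

theorem everyNth_nil (m k : Int) (hm : 0 ≤ m) (hk : 0 < k) : everyNth [] m k = [] := by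
  rw [everyNth, PySem.List.pyRange_of_pos _ _ hk]
  simp
  omega

theorem pyGetD_cons_shift (x : String) (xs : List String) (i : Int) (hi : 1 ≤ i) (d : String) :
    PySem.List.pyGetD (x :: xs) i d = PySem.List.pyGetD xs (i - 1) d := by
  have h0 : (0:Int) ≤ i := by omega
  have h0' : (0:Int) ≤ i - 1 := by omega
  simp only [PySem.List.pyGetD, PySem.List.pyGet?, PySem.List.pyIdx?, if_pos h0, if_pos h0']
  by_cases hlt : i < ((x :: xs).length : Int)
  · have hlt' : i - 1 < (xs.length : Int) := by simp at hlt ⊢; omega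
    rw [if_pos hlt, if_pos hlt']
    simp only [Option.bind_some]
    have : i.toNat = (i-1).toNat + 1 := by omega
    rw [this]; simp
  · have hlt' : ¬ (i - 1 < (xs.length : Int)) := by simp at hlt ⊢; omega
    rw [if_neg hlt, if_neg hlt']; simp

theorem everyNth_cons_pos (x : String) (xs : List String) (m k : Int) (hm : 0 < m) (hk : 0 < k) :
    everyNth (x :: xs) m k = everyNth xs (m - 1) k := by
  rw [everyNth, everyNth, PySem.List.pyRange_of_pos _ _ hk, PySem.List.pyRange_of_pos _ _ hk]
  have hcount : (if m < (((x :: xs).length : Int)) then ((((x :: xs).length : Int) - m + k - 1) / k).toNat else 0)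
      = (if m - 1 < (xs.length : Int) then (((xs.length : Int) - (m - 1) + k - 1) / k).toNat else 0) := by
    simp only [List.length_cons]
    by_cases h : m - 1 < (xs.length : Int)
    · rw [if_pos (by push_cast; omega), if_pos h]
      congr 1
      push_cast
      ring_nf
    · rw [if_neg (by push_cast; omega), if_neg h]
  rw [hcount]
  simp only [List.map_map, List.map_inj_left, Function.comp_apply]
  intro a _
  have hka : (0:Int) ≤ k * (a:Int) := mul_nonneg hk.le (Int.natCast_nonneg a)
  have h1 : (1:Int) ≤ m + k * (a:Int) := by omega
  rw [pyGetD_cons_shift _ _ _ h1]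
  ring_nf

theorem everyNth_cons_zero (x : String) (xs : List String) (k : Int) (hk : 0 < k) :
    everyNth (x :: xs) 0 k = x :: everyNth xs (k - 1) k := by
  rw [everyNth, everyNth, PySem.List.pyRange_of_pos _ _ hk, PySem.List.pyRange_of_pos _ _ hk]
  have hdn : (0:Int) ≤ (xs.length : Int) / k := Int.ediv_nonneg (Int.natCast_nonneg _) hk.le
  have hcL : (if (0:Int) < (((x :: xs).length : Int)) then ((((x :: xs).length : Int) - 0 + k - 1) / k).toNat else 0)
      = ((xs.length : Int) / k).toNat + 1 := by
    rw [if_pos (by simp only [List.length_cons]; push_cast; omega)]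
    have : (((x :: xs).length : Int) - 0 + k - 1) = (xs.length : Int) + 1 * k := by
      simp only [List.length_cons]; push_cast; ring
    rw [this, Int.add_mul_ediv_right _ _ (by omega)]
    omega
  have hcR : (if k - 1 < ((xs.length : Int)) then (((xs.length : Int) - (k - 1) + k - 1) / k).toNat else 0)
      = ((xs.length : Int) / k).toNat := by
    by_cases h : k - 1 < (xs.length : Int)
    · rw [if_pos h]
      ring_nf
    · rw [if_neg h]
      have : (xs.length : Int) / k = 0 := Int.ediv_eq_zero_of_lt (Int.natCast_nonneg _) (by omega)
      omega
  rw [hcL, hcR, List.range_succ_eq_map]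
  simp only [List.map_cons, List.map_map]
  congr 1
  · simp [PySem.List.pyGetD_zero_cons]
  · apply List.map_congr_left
    intro a _
    simp only [Function.comp_apply]
    have hka : (0:Int) ≤ k * (a:Int) := mul_nonneg hk.le (Int.natCast_nonneg a)
    have h1 : (1:Int) ≤ 0 + k * ((Nat.succ a : Nat) : Int) := by push_cast; nlinarith
    rw [pyGetD_cons_shift _ _ _ h1]
    congr 1
    push_cast
    ring

theorem selMod_eq_everyNth (k r : Int) (hk : 0 < k) (hr0 : 0 ≤ r) (hrk : r < k)
    (xs : List String) (i : Int) :
    selMod k r xs i = everyNth xs (PySem.Int.mod (r - i) k) k := by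
  induction xs generalizing i with
  | nil =>
    rw [everyNth_nil _ _ (PySem.Int.mod_nonneg _ hk) hk]
    rfl
  | cons x xs ih =>
    have hmodeq : PySem.Int.mod (r - i) k = (r - i) % k := PySem.Int.mod_eq_emod_of_pos hk
    have hmodeq' : PySem.Int.mod (r - (i+1)) k = (r - (i+1)) % k := PySem.Int.mod_eq_emod_of_pos hk
    have himodeq : PySem.Int.mod i k = i % k := PySem.Int.mod_eq_emod_of_pos hk
    have hrr : r % k = r := Int.emod_eq_of_lt hr0 hrk
    rw [selMod]
    by_cases hc : PySem.Int.mod i k = r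
    · -- this element lands in bucket r: (r - i) % k = 0
      have hdvd : k ∣ (r - i) := by
        have h2 : i % k = r % k := by rw [← himodeq, hc, hrr]
        exact Int.ModEq.dvd (h2 : i ≡ r [ZMOD k])
      have hm0 : PySem.Int.mod (r - i) k = 0 := by
        rw [hmodeq]; exact Int.emod_eq_zero_of_dvd hdvd
      have hnext : PySem.Int.mod (r - (i+1)) k = k - 1 := by
        rw [hmodeq']
        have h1 : (r - (i+1)) ≡ (k - 1) [ZMOD k] := by
          apply Int.modEq_iff_dvd.mpr
          have : (k - 1) - (r - (i+1)) = k - (r - i) := by ring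
          rw [this]
          exact dvd_sub (dvd_refl k) hdvd
        rw [h1]
        exact Int.emod_eq_of_lt (by omega) (by omega)
      rw [hm0, if_pos hc, ih (i+1), hnext, everyNth_cons_zero _ _ _ hk]
      simp
    · -- skipped: (r - i) % k > 0
      have hm0 : PySem.Int.mod (r - i) k ≠ 0 := by
        rw [hmodeq]
        intro h
        have hdvd : k ∣ (r - i) := Int.dvd_of_emod_eq_zero h
        have h3 : i ≡ r [ZMOD k] := (Int.modEq_iff_dvd (a := i) (b := r) (n := k)).mpr hdvd
        apply hc
        rw [himodeq]
        calc i % k = r % k := h3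
        _ = r := hrr
      have hpos : 0 < PySem.Int.mod (r - i) k := by
        have := PySem.Int.mod_nonneg (r - i) hk; omega
      have hnext : PySem.Int.mod (r - (i+1)) k = PySem.Int.mod (r - i) k - 1 := by
        rw [hmodeq', hmodeq]
        have h1 : (r - (i+1)) ≡ ((r - i) % k - 1) [ZMOD k] := by
          apply Int.modEq_iff_dvd.mpr
          have : ((r - i) % k - 1) - (r - (i+1)) = (r - i) % k - (r - i) := by ring
          rw [this]
          have hmm : ((r - i) % k) ≡ (r - i) [ZMOD k] := Int.emod_emod_of_dvd (r - i) dvd_rfl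
          exact Int.ModEq.dvd hmm.symm
        rw [h1]
        have hlt : (r - i) % k < k := Int.emod_lt_of_pos _ hk
        rw [hmodeq] at hpos
        exact Int.emod_eq_of_lt (by omega) (by omega)
      rw [if_neg hc, ih (i+1), hnext, everyNth_cons_pos _ _ _ _ hpos hk]
      simp

theorem d0_getD (j : Int) :
    (([1,2,3,4,5,6,7] : List Int).foldl (fun d s => d.insert s ([] : List String)) PySem.Dict.empty).getD j [] = [] := by
  rw [show ([1,2,3,4,5,6,7] : List Int).foldl (fun d s => d.insert s ([] : List String)) PySem.Dict.empty
      = PySem.Dict.mk [(1,[]),(2,[]),(3,[]),(4,[]),(5,[]),(6,[]),(7,[])] from rfl]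
  simp [PySem.Dict.getD_eq_get?_getD, PySem.Dict.get?_mk_cons]
  split_ifs <;> rfl

theorem obl_bucket (j : Int) (h0 : 0 ≤ j - 1) (h6 : j - 1 < 6) (xs : List String) :
    selKeyed semsObl j xs 0 = everyNth xs (j - 1) 6 := by
  rw [selKeyed_obl, selMod_eq_everyNth 6 (j-1) (by norm_num) h0 h6]
  congr 1
  rw [PySem.Int.mod_eq_emod_of_pos (by norm_num)]
  rw [show j - 1 - 0 = j - 1 by ring]
  exact Int.emod_eq_of_lt h0 h6

theorem var_bucket (j : Int) (h0 : 0 ≤ j - 3) (h5 : j - 3 < 5) (xs : List String) :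
    selKeyed semsVar j xs 0 = everyNth xs (j - 3) 5 := by
  rw [selKeyed_var, selMod_eq_everyNth 5 (j-3) (by norm_num) h0 h5]
  congr 1
  rw [PySem.Int.mod_eq_emod_of_pos (by norm_num)]
  rw [show j - 3 - 0 = j - 3 by ring]
  exact Int.emod_eq_of_lt h0 h5

-- ===== VERDICT (by name: the statement is the Claim_ definition above) =====
theorem balanced_distribution_spec : Claim_equal_balanced_distribution := by
  intro ob var _hdom
  unfold Spec_balanced_distribution
  simp only [balanced_distribution, balanced_distribution_alt]
  have hd0keys : ((PySem.List.pyRange 1 8 1).foldl (fun d s => d.insert s ([] : List String)) PySem.Dict.empty).keys = [1,2,3,4,5,6,7] := by decide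
  have hk1 := foldA_keys semsObl ob
      ((PySem.List.pyRange 1 8 1).foldl (fun d s => d.insert s ([] : List String)) PySem.Dict.empty)
      0 (by decide) (by rw [hd0keys]; decide)
  have hk2 := foldA_keys semsVar var
      ((PySem.List.enumerate ob).foldl
        (fun d p => d.modify (PySem.List.pyGetD semsObl (PySem.Int.mod p.1 (semsObl.length : Int)) 0) [] (fun l => l ++ [p.2]))
        ((PySem.List.pyRange 1 8 1).foldl (fun d s => d.insert s ([] : List String)) PySem.Dict.empty))
      0 (by decide) (by rw [hk1, hd0keys]; decide)
  have hkeys2 := hk2.trans (hk1.trans hd0keys)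
  rw [PySem.Dict.items_eq_map_keys _ (by rw [hkeys2]; decide) ([] : List String), hkeys2,
    show PySem.List.pyRange 1 8 1 = [1,2,3,4,5,6,7] from rfl]
  simp only [List.map_cons, List.map_nil, List.cons.injEq, Prod.mk.injEq, and_true, true_and]
  refine ⟨?_, ?_, ?_, ?_, ?_, ?_, ?_⟩ <;>
    rw [foldA_getD, foldA_getD, d0_getD, List.nil_append]
  · rw [obl_bucket 1 (by norm_num) (by norm_num),
        selKeyed_nil_of_not_mem semsVar 1 (by decide) (by decide)]
    norm_num
  · rw [obl_bucket 2 (by norm_num) (by norm_num),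
        selKeyed_nil_of_not_mem semsVar 2 (by decide) (by decide)]
    norm_num
  · rw [obl_bucket 3 (by norm_num) (by norm_num), var_bucket 3 (by norm_num) (by norm_num)]
    norm_num
  · rw [obl_bucket 4 (by norm_num) (by norm_num), var_bucket 4 (by norm_num) (by norm_num)]
    norm_num
  · rw [obl_bucket 5 (by norm_num) (by norm_num), var_bucket 5 (by norm_num) (by norm_num)]
    norm_num
  · rw [obl_bucket 6 (by norm_num) (by norm_num), var_bucket 6 (by norm_num) (by norm_num)]
    norm_num
  · rw [selKeyed_nil_of_not_mem semsObl 7 (by decide) (by decide),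
        var_bucket 7 (by norm_num) (by norm_num)]
    norm_num
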